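-- pv_equiv track=rewrite | github.com/child-lab-uj/child-lab-framework | child_lab_framework/core/flow/compilation.py | ordered_components
-- ===== SOURCE A (Python) =====
-- def topological_order_from_root(
--     inputs: set[str],
--     dependencies: dict[str, tuple[str, ...]],
--     root: str,
--     visited: dict[str, bool]
-- ) -> list[str]:
--     if (
--         visited.get(root) is True or
--         root in inputs
--     ):
--         return []
--
--     if root not in dependencies:
--         # TODO: warn about dead component
--         return []
--
--     visited[root] = True
--
--     return sum(
--         (
--             topological_order_from_root(
--                 inputs,
--                 dependencies,
--                 dependency,
--                 visited
--             )
--             for dependency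
--             in dependencies[root]
--         ),
--         start=[]
--     ) + [root]
--
-- def ordered_components(inputs: list[str], outputs: list[str], dependencies: dict[str, tuple[str, ...]]) -> list[str]:
--     visited = dict()
--
--     return sum(
--         (
--             topological_order_from_root(
--                 set(inputs),
--                 dependencies,
--                 root,
--                 visited
--             )
--             for root
--             in outputs
--         ),
--         start=[]
--     )
-- ===== SOURCE B (Python) =====
-- def ordered_components(inputs: list[str], outputs: list[str], dependencies: dict[str, tuple[str, ...]]) -> list[str]:
--     input_set = set(inputs)
--     visited = set()
--     order = []
--
--     def visit(node: str) -> None: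
--         if node in visited or node in input_set or node not in dependencies:
--             return
--         visited.add(node)
--         for dep in dependencies[node]:
--             visit(dep)
--         order.append(node)
--
--     for root in outputs:
--         visit(root)
--     return order
-- ===== Notes on version B (the rewrite author's own statement) =====
-- stated objective: faster
-- what changed: Replaces per-root list concatenation via sum() and a fresh set(inputs) per output root with a single shared accumulator list appended to in post-order, one visited set, and one precomputed input set.
import Mathlib
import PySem

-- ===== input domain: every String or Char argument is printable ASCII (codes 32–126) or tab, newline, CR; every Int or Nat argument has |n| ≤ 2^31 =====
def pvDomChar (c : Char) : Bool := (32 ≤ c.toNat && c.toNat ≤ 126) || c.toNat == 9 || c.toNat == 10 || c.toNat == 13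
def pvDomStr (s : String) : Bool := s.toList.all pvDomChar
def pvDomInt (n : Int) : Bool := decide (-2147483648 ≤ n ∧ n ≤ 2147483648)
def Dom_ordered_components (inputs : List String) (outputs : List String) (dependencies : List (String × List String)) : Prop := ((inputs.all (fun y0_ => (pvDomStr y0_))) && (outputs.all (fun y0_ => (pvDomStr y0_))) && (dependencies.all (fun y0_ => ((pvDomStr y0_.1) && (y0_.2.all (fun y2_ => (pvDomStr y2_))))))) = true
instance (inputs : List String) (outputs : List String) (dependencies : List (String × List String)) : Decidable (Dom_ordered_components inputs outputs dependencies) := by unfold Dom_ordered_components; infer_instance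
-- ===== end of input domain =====

-- B replaces A's per-root set(inputs) and quadratic sum()-of-lists with one DFS over a
-- shared accumulator list, one visited set and one precomputed input set (same output).
-- Both ports use a fuel counter (dependencies.length + 1) solely to make the shared-visited
-- recursion structural; it is never exhausted on any input (the visited marking bounds the
-- recursion depth by the number of dependency keys).

-- ===== PORT A =====
def topological_order_from_root (fuel : Nat) (inputs : PySem.Set String)
    (dependencies : PySem.Dict String (List String)) (root : String)
    (visited : PySem.Dict String Bool) : List String × PySem.Dict String Bool :=
  match fuel with
  | 0 => ([], visited)  -- fuel guard only; unreachable at the fuel ordered_components supplies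
  | fuel + 1 =>
    if visited.get? root = some true ∨ PySem.Set.contains inputs root then
      ([], visited)
    else if (dependencies.get? root).isNone then
      ([], visited)
    else
      let visited := visited.insert root true
      let r := ((dependencies.get? root).getD []).foldl
        (fun (p : List String × PySem.Dict String Bool) dep =>
          let q := topological_order_from_root fuel inputs dependencies dep p.2
          (p.1 ++ q.1, q.2)) ([], visited)
      (r.1 ++ [root], r.2)

def ordered_components (inputs : List String) (outputs : List String)
    (dependencies : List (String × List String)) : List String :=
  (outputs.foldl
    (fun (p : List String × PySem.Dict String Bool) root =>
      let q := topological_order_from_root (dependencies.length + 1)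
        (PySem.Set.ofList inputs) (PySem.Dict.mk dependencies) root p.2
      (p.1 ++ q.1, q.2)) ([], PySem.Dict.empty)).1

-- ===== PORT B =====
def ocVisit (fuel : Nat) (inputSet : PySem.Set String)
    (dependencies : PySem.Dict String (List String)) (node : String)
    (st : List String × PySem.Set String) : List String × PySem.Set String :=
  match fuel with
  | 0 => st  -- fuel guard only; unreachable at the fuel ordered_components_alt supplies
  | fuel + 1 =>
    if PySem.Set.contains st.2 node || PySem.Set.contains inputSet node
        || !(dependencies.contains node) then
      st
    else
      let st1 : List String × PySem.Set String := (st.1, PySem.Set.add st.2 node)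
      let st2 := ((dependencies.get? node).getD []).foldl
        (fun s dep => ocVisit fuel inputSet dependencies dep s) st1
      (st2.1 ++ [node], st2.2)

def ordered_components_alt (inputs : List String) (outputs : List String)
    (dependencies : List (String × List String)) : List String :=
  let inputSet := PySem.Set.ofList inputs
  let deps := PySem.Dict.mk dependencies
  (outputs.foldl (fun st root => ocVisit (dependencies.length + 1) inputSet deps root st)
    ([], PySem.Set.empty)).1

-- ===== PRECONDITION & SPEC =====
def Spec_ordered_components (inputs : List String) (outputs : List String) (dependencies : List (String × List String)) (out : List String) : Prop := out = ordered_components_alt inputs outputs dependencies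
instance (inputs : List String) (outputs : List String) (dependencies : List (String × List String)) (out : List String) : Decidable (Spec_ordered_components inputs outputs dependencies out) := by unfold Spec_ordered_components; infer_instance

-- ===== CLAIM (what is proved, stated in full; the proofs are below) =====
def Claim_equal_ordered_components : Prop := ∀ (inputs : List String) (outputs : List String) (dependencies : List (String × List String)), Dom_ordered_components inputs outputs dependencies → Spec_ordered_components inputs outputs dependencies (ordered_components inputs outputs dependencies)

-- ===== LEMMAS AND PROOFS =====

-- the visited dict of A (only ever mapped to true) and the visited set of B agree
def VisRel (vD : PySem.Dict String Bool) (vS : PySem.Set String) : Prop :=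
  ∀ s : String, vD.get? s = some true ↔ PySem.Set.contains vS s = true

lemma visRel_empty : VisRel PySem.Dict.empty PySem.Set.empty := by
  intro s; simp [PySem.Dict.empty, PySem.Dict.get?, PySem.Set.empty, PySem.Set.contains]

lemma visRel_insert_add {vD vS} (h : VisRel vD vS) (x : String) :
    VisRel (vD.insert x true) (PySem.Set.add vS x) := by
  intro s
  rw [PySem.Dict.get?_insert]
  constructor
  · intro hs
    by_cases hx : s = x
    · subst hx; simp [PySem.Set.mem_add]
    · simp [hx] at hs
      have := (h s).mp hs
      simp [PySem.Set.mem_add]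
      simp at this
      tauto
  · intro hs
    simp [PySem.Set.mem_add] at hs
    by_cases hx : s = x
    · simp [hx]
    · simp [hx]
      exact (h s).mpr (by simp; tauto)

-- A's inner/outer fold over dependency lists, abbreviated for the lemmas
def afold (fuel : Nat) (iset : PySem.Set String) (deps : PySem.Dict String (List String))
    (nodes : List String) (p : List String × PySem.Dict String Bool) :
    List String × PySem.Dict String Bool :=
  nodes.foldl (fun p dep =>
    let q := topological_order_from_root fuel iset deps dep p.2
    (p.1 ++ q.1, q.2)) p

def bfold (fuel : Nat) (iset : PySem.Set String) (deps : PySem.Dict String (List String))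
    (nodes : List String) (st : List String × PySem.Set String) :
    List String × PySem.Set String :=
  nodes.foldl (fun s dep => ocVisit fuel iset deps dep s) st

lemma afold_shift (fuel iset deps) : ∀ (nodes : List String) (a : List String) vD,
    afold fuel iset deps nodes (a, vD) =
      (a ++ (afold fuel iset deps nodes ([], vD)).1, (afold fuel iset deps nodes ([], vD)).2) := by
  intro nodes
  induction nodes with
  | nil => intro a vD; simp [afold]
  | cons d rest ih =>
    intro a vD
    simp only [afold, List.foldl_cons, List.nil_append] at *
    rw [ih (a ++ (topological_order_from_root fuel iset deps d vD).1), ih ((topological_order_from_root fuel iset deps d vD).1)]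
    simp [List.append_assoc]

-- key step lemma: one B-visit equals appending A's result list, preserving VisRel
lemma visit_eq (fuel : Nat) (iset : PySem.Set String) (deps : PySem.Dict String (List String)) :
    ∀ (node : String) (acc : List String) vS vD, VisRel vD vS →
      ocVisit fuel iset deps node (acc, vS) =
        (acc ++ (topological_order_from_root fuel iset deps node vD).1,
         (ocVisit fuel iset deps node (acc, vS)).2) ∧
      VisRel (topological_order_from_root fuel iset deps node vD).2
             (ocVisit fuel iset deps node (acc, vS)).2 := by
  induction fuel with
  | zero => intro node acc vS vD h; simp [ocVisit, topological_order_from_root]; exact h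
  | succ fuel ih =>
    intro node acc vS vD h
    by_cases h1 : vD.get? node = some true
    · have hmS : node ∈ vS := by
        have := (h node).mp h1; simpa [PySem.Set.contains] using this
      simp only [ocVisit, topological_order_from_root, h1]
      simp [hmS]
      exact h
    · have hmS : node ∉ vS := by
        intro hc
        exact h1 ((h node).mpr (by simpa [PySem.Set.contains] using hc))
      by_cases h2 : node ∈ iset
      · simp only [ocVisit, topological_order_from_root]
        simp [hmS, h2, h1]
        exact h
      · by_cases h3 : deps.get? node = none
        · have h3' : deps.contains node = false := by
            rw [PySem.Dict.contains_eq_isSome_get?, h3]; rfl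
          simp only [ocVisit, topological_order_from_root]
          simp [hmS, h2, h1, h3, h3']
          exact h
        · have h3' : deps.contains node = true := by
            rw [PySem.Dict.contains_eq_isSome_get?]
            cases hg : deps.get? node with
            | none => exact absurd hg h3
            | some v => rfl
          have hrel := visRel_insert_add h node
          -- fold over the dependency list, with the IH at smaller fuel
          have hfold : ∀ (nodes : List String) (a : List String) vS vD, VisRel vD vS →
              bfold fuel iset deps nodes (a, vS) =
                (a ++ (afold fuel iset deps nodes ([], vD)).1,
                 (bfold fuel iset deps nodes (a, vS)).2) ∧
              VisRel (afold fuel iset deps nodes ([], vD)).2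
                     (bfold fuel iset deps nodes (a, vS)).2 := by
            intro nodes
            induction nodes with
            | nil => intro a vS vD hr; simp [afold, bfold]; exact hr
            | cons d rest ihr =>
              intro a vS vD hr
              have hv := ih d a vS vD hr
              simp only [bfold, afold, List.foldl_cons, List.nil_append]
              rw [hv.1]
              have hrest := ihr (a ++ (topological_order_from_root fuel iset deps d vD).1)
                (ocVisit fuel iset deps d (a, vS)).2
                (topological_order_from_root fuel iset deps d vD).2 hv.2
              simp only [bfold, afold] at hrest
              rw [hrest.1]
              have hsh := afold_shift fuel iset deps rest
                ((topological_order_from_root fuel iset deps d vD).1)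
                ((topological_order_from_root fuel iset deps d vD).2)
              simp only [afold] at hsh
              rw [hsh]
              exact ⟨by simp [List.append_assoc], hrest.2⟩
          have hmain := hfold ((deps.get? node).getD []) acc (PySem.Set.add vS node) (vD.insert node true) hrel
          simp only [bfold, afold] at hmain
          have hadd : PySem.Set.add vS node = vS ++ [node] := by
            simp [PySem.Set.add, PySem.Set.contains, hmS]
          rw [hadd] at hmain
          simp only [ocVisit, topological_order_from_root]
          simp [hmS, h2, h1, h3, h3']
          rw [hmain.1]
          exact ⟨by simp [List.append_assoc], hmain.2⟩

-- ===== VERDICT (by name: the statement is the Claim_ definition above) =====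
theorem ordered_components_spec : Claim_equal_ordered_components := by
  intro inputs outputs dependencies _
  unfold Spec_ordered_components ordered_components ordered_components_alt
  -- both sides are the two folds over outputs starting from empty visited structures
  have hfold : ∀ (nodes : List String) (a : List String) vS vD, VisRel vD vS →
      (bfold (dependencies.length + 1) (PySem.Set.ofList inputs) (PySem.Dict.mk dependencies) nodes (a, vS)).1 =
        a ++ (afold (dependencies.length + 1) (PySem.Set.ofList inputs) (PySem.Dict.mk dependencies) nodes ([], vD)).1 := by
    intro nodes
    induction nodes with
    | nil => intro a vS vD hr; simp [afold, bfold]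
    | cons d rest ihr =>
      intro a vS vD hr
      have hv := visit_eq (dependencies.length + 1) (PySem.Set.ofList inputs) (PySem.Dict.mk dependencies) d a vS vD hr
      simp only [bfold, afold, List.foldl_cons, List.nil_append]
      rw [hv.1]
      have := ihr (a ++ (topological_order_from_root (dependencies.length + 1) (PySem.Set.ofList inputs) (PySem.Dict.mk dependencies) d vD).1)
        (ocVisit (dependencies.length + 1) (PySem.Set.ofList inputs) (PySem.Dict.mk dependencies) d (a, vS)).2
        (topological_order_from_root (dependencies.length + 1) (PySem.Set.ofList inputs) (PySem.Dict.mk dependencies) d vD).2 hv.2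
      simp only [bfold, afold] at this
      rw [this]
      have hsh := afold_shift (dependencies.length + 1) (PySem.Set.ofList inputs) (PySem.Dict.mk dependencies) rest
        ((topological_order_from_root (dependencies.length + 1) (PySem.Set.ofList inputs) (PySem.Dict.mk dependencies) d vD).1)
        ((topological_order_from_root (dependencies.length + 1) (PySem.Set.ofList inputs) (PySem.Dict.mk dependencies) d vD).2)
      simp only [afold] at hsh
      rw [hsh]
      simp [List.append_assoc]
  have := hfold outputs [] PySem.Set.empty PySem.Dict.empty visRel_empty
  simp only [bfold, afold] at this
  rw [this]
  simp
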